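-- pv_equiv track=rewrite | github.com/lovatorodrigo/Gene_and_Protein_Analyzer | app_streamlit.py | effatha_variant_flags
-- ===== SOURCE A (Python) =====
-- def effatha_variant_flags(seq: str):
--     flags = []
--     i = 0
--     L = len(seq or "")
--     while i < L:
--         ch = seq[i]
--         if ch == "[":
--             j = seq.find("]", i+1)
--             if j == -1:
--                 flags.append(0)
--                 i += 1
--             else:
--                 flags.append(1)
--                 i = j + 1
--         elif ch == "*" and i == L - 1:
--             i += 1
--         else:
--             flags.append(0)
--             i += 1
--     return flags
-- ===== SOURCE B (Python) =====
-- def effatha_variant_flags(seq: str):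
--     # One pass to find the last ']', then one forward pass with a skip flag:
--     # a '[' opens a matched bracket iff some ']' lies strictly after it.
--     s = seq or ""
--     r = -1  # index of the last ']' in s (-1 if none)
--     for k, ch in enumerate(s):
--         if ch == "]":
--             r = k
--     flags = []
--     skipping = False
--     for i, ch in enumerate(s):
--         if skipping:
--             skipping = ch != "]"
--         elif ch == "[" and i < r:
--             flags.append(1)
--             skipping = True
--         elif ch == "*" and i == len(s) - 1:
--             pass
--         else:
--             flags.append(0)
--     return flags
-- ===== Notes on version B (the rewrite author's own statement) =====
-- stated objective: alternative
-- what changed: A rescans with seq.find(']', i+1) at every '[' and jumps past the match; B records the last ']' index in one preliminary pass and then runs a single forward pass with a skip-flag state machine, so no repeated substring search and no index jumping remain.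
import Mathlib
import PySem

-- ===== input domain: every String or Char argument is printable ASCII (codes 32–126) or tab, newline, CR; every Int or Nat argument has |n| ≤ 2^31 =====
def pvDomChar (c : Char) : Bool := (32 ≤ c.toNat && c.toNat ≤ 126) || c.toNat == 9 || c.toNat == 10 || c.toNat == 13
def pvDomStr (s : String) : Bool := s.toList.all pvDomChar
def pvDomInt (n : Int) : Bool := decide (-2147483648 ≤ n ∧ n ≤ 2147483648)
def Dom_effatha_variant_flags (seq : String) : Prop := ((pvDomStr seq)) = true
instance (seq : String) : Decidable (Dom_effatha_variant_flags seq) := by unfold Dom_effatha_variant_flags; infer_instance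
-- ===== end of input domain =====

-- B replaces A's repeated seq.find("]", i+1)-and-jump loop by one pass recording the
-- last ']' index and one forward pass with a skip flag.

-- ===== PORT A =====
-- the while loop of A: index i, seq[i], find("]", i+1), jump to j+1 on success.
-- fuel = remaining loop iterations (each iteration advances i by at least 1,
-- so cs.length is always enough); it only makes the recursion structural.
def pvAgo (cs : List Char) : Nat → Nat → List Int
  | 0, _ => []
  | fuel + 1, i =>
    if h : i < cs.length then
      let ch := cs[i]
      if ch = '[' then
        let j := PySem.Chars.findFrom cs [']'] ((i : Int) + 1)
        if j = -1 then 0 :: pvAgo cs fuel (i + 1)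
        else 1 :: pvAgo cs fuel (j.toNat + 1)
      else if ch = '*' ∧ i = cs.length - 1 then pvAgo cs fuel (i + 1)
      else 0 :: pvAgo cs fuel (i + 1)
    else []

def effatha_variant_flags (seq : String) : List Int :=
  pvAgo seq.toList seq.toList.length 0

-- ===== PORT B =====
-- first for loop of B: r = index of the last ']' (-1 if none)
def pvRlast : List Char → Nat → Int → Int
  | [], _, r => r
  | ch :: rest, k, r => pvRlast rest (k + 1) (if ch = ']' then (k : Int) else r)

-- second for loop of B: skip flag state machine over (i, ch)
def pvBgo (r : Int) (L : Nat) : List Char → Nat → Bool → List Int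
  | [], _, _ => []
  | ch :: rest, i, sk =>
    if sk then pvBgo r L rest (i + 1) (ch != ']')
    else if ch = '[' ∧ (i : Int) < r then 1 :: pvBgo r L rest (i + 1) true
    else if ch = '*' ∧ i = L - 1 then pvBgo r L rest (i + 1) sk
    else 0 :: pvBgo r L rest (i + 1) sk

def effatha_variant_flags_alt (seq : String) : List Int :=
  let cs := seq.toList
  pvBgo (pvRlast cs 0 (-1)) cs.length cs 0 false

-- ===== PRECONDITION & SPEC =====
def Spec_effatha_variant_flags (seq : String) (out : List Int) : Prop := out = effatha_variant_flags_alt seq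
instance (seq : String) (out : List Int) : Decidable (Spec_effatha_variant_flags seq out) := by unfold Spec_effatha_variant_flags; infer_instance

-- ===== CLAIM (what is proved, stated in full; the proofs are below) =====
def Claim_equal_effatha_variant_flags : Prop := ∀ (seq : String), Dom_effatha_variant_flags seq → Spec_effatha_variant_flags seq (effatha_variant_flags seq)

-- ===== LEMMAS AND PROOFS =====

-- [a] <+: l ↔ l starts with a
theorem pvSingleton_prefix (l : List Char) (a : Char) : [a] <+: l ↔ l.head? = some a := by
  cases l <;> simp [List.cons_prefix_cons, eq_comm]

-- [a] <:+: l ↔ a ∈ l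
theorem pvSingleton_infix (l : List Char) (a : Char) : [a] <:+: l ↔ a ∈ l := by
  constructor
  · intro h; exact h.mem (by simp)
  · intro h
    obtain ⟨s, t, rfl⟩ := List.append_of_mem h
    exact ⟨s, t, by simp⟩

-- characterization of pvRlast
theorem pvRlast_lt_iff (cs : List Char) : ∀ (k : Nat) (r0 : Int), r0 < (k : Int) → ∀ (i : Int),
    (i < pvRlast cs k r0 ↔ i < r0 ∨ ∃ j : Nat, i < (k : Int) + j ∧ cs[j]? = some ']') := by
  induction cs with
  | nil => intro k r0 _ i; simp [pvRlast]
  | cons ch rest ih =>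
    intro k r0 hr0 i
    rw [pvRlast, ih (k + 1) _ (by split <;> push_cast <;> omega)]
    constructor
    · rintro (h | ⟨j, hj, hget⟩)
      · split at h
        · next hc => exact Or.inr ⟨0, by push_cast; omega, by simp [hc]⟩
        · exact Or.inl h
      · exact Or.inr ⟨j + 1, by push_cast at hj ⊢; omega, by simpa using hget⟩
    · rintro (h | ⟨j, hj, hget⟩)
      · left; split <;> omega
      · cases j with
        | zero =>
          left
          have hc : ch = ']' := by simpa using hget
          rw [if_pos hc]; push_cast at hj; omega
        | succ j =>
          right; exact ⟨j, by push_cast at hj ⊢; omega, by simpa using hget⟩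

-- (i < r) ↔ a ']' occurs strictly after position i
theorem pvRlast_spec (cs : List Char) (i : Nat) :
    (i : Int) < pvRlast cs 0 (-1) ↔ ']' ∈ cs.drop (i + 1) := by
  rw [pvRlast_lt_iff cs 0 (-1) (by norm_num)]
  constructor
  · rintro (h | ⟨j, hj, hget⟩)
    · omega
    · have hj' : i + 1 ≤ j := by push_cast at hj; omega
      rw [List.mem_iff_getElem?]
      exact ⟨j - (i + 1), by rw [List.getElem?_drop]; rwa [Nat.add_sub_cancel' hj']⟩
  · intro h
    rw [List.mem_iff_getElem?] at h
    obtain ⟨n, hn⟩ := h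
    rw [List.getElem?_drop] at hn
    exact Or.inr ⟨i + 1 + n, by push_cast; omega, hn⟩

-- while skipping, pvBgo consumes everything up to and including the first ']'
theorem pvSkip (r : Int) (cs : List Char) (jn : Nat) (hjn : jn < cs.length)
    (hget : cs[jn]? = some ']') :
    ∀ d m, jn - m = d → m ≤ jn → (∀ p, m ≤ p → p < jn → cs[p]? ≠ some ']') →
      pvBgo r cs.length (cs.drop m) m true = pvBgo r cs.length (cs.drop (jn + 1)) (jn + 1) false := by
  intro d
  induction d with
  | zero =>
    intro m hd hm _
    have hjel : cs[jn]'hjn = ']' := by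
      have := List.getElem?_eq_getElem hjn
      rw [hget] at this; exact (Option.some_inj.mp this).symm
    have hmj : m = jn := by omega
    subst hmj
    rw [List.drop_eq_getElem_cons hjn, pvBgo]
    simp [hjel]
  | succ d ih =>
    intro m hd hm hno
    have hmlt : m < jn := by omega
    have hmL : m < cs.length := by omega
    rw [List.drop_eq_getElem_cons hmL, pvBgo]
    have hne : cs[m] ≠ ']' := by
      intro hc
      exact hno m le_rfl hmlt (by rw [List.getElem?_eq_getElem hmL, hc])
    have : (cs[m] != ']') = true := by simp [hne]
    rw [this]
    exact ih (m + 1) (by omega) (by omega) (fun p hp1 hp2 => hno p (by omega) hp2)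

-- main induction: A's while loop = B's state machine (not skipping), position by position
theorem pvMain (cs : List Char) : ∀ (fuel i : Nat), cs.length - i ≤ fuel →
    pvAgo cs fuel i = pvBgo (pvRlast cs 0 (-1)) cs.length (cs.drop i) i false := by
  intro fuel
  induction fuel with
  | zero =>
    intro i hi
    have hL : cs.length ≤ i := by omega
    rw [pvAgo, List.drop_eq_nil_of_le hL, pvBgo]
  | succ n ih =>
    intro i hi
    by_cases h : i < cs.length
    · rw [List.drop_eq_getElem_cons h, pvAgo, dif_pos h, pvBgo,
        if_neg Bool.false_ne_true]
      by_cases hbr : cs[i] = '['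
      · -- the '[' case
        rw [if_pos hbr]
        have hk : i + 1 ≤ cs.length := h
        have hcast : ((i + 1 : Nat) : Int) = (i : Int) + 1 := by push_cast; ring
        by_cases hj : PySem.Chars.findFrom cs [']'] ((i : Int) + 1) = -1
        · -- no ']' after position i
          rw [if_pos hj]
          have hnif : ¬ [']'] <:+: cs.drop (i + 1) := by
            rw [← PySem.Chars.findFrom_natCast_eq_neg_one_iff cs [']'] (i + 1) hk, hcast]
            exact hj
          have hnr : ¬ ((i : Int) < pvRlast cs 0 (-1)) := by
            rw [pvRlast_spec, ← pvSingleton_infix]; exact hnif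
          rw [if_neg (show ¬ (cs[i] = '[' ∧ (i : Int) < pvRlast cs 0 (-1)) from
                fun hc => hnr hc.2),
            if_neg (show ¬ (cs[i] = '*' ∧ i = cs.length - 1) from
                fun hc => absurd (hbr.symm.trans hc.1) (by decide)),
            ih (i + 1) (by omega)]
        · -- a ']' is found at j
          rw [if_neg hj]
          obtain ⟨hle, hpre, hmin⟩ :=
            PySem.Chars.findFrom_natCast_spec cs [']'] (i + 1) hk (by rw [hcast]; exact hj)
          rw [hcast] at hle hpre hmin
          set j := PySem.Chars.findFrom cs [']'] ((i : Int) + 1) with hjdef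
          have hij : i + 1 ≤ j.toNat := by omega
          rw [pvSingleton_prefix, List.head?_drop] at hpre
          have hjL : j.toNat < cs.length := (List.getElem?_eq_some_iff.mp hpre).1
          have hir : (i : Int) < pvRlast cs 0 (-1) := by
            rw [pvRlast_spec, List.mem_iff_getElem?]
            refine ⟨j.toNat - (i + 1), ?_⟩
            rw [List.getElem?_drop, Nat.add_sub_cancel' hij]
            exact hpre
          rw [if_pos (show cs[i] = '[' ∧ (i : Int) < pvRlast cs 0 (-1) from ⟨hbr, hir⟩)]
          have hno : ∀ p, i + 1 ≤ p → p < j.toNat → cs[p]? ≠ some ']' := by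
            intro p hp1 hp2 hc
            exact hmin p hp1 hp2 (by rw [pvSingleton_prefix, List.head?_drop]; exact hc)
          rw [pvSkip (pvRlast cs 0 (-1)) cs j.toNat hjL hpre (j.toNat - (i + 1)) (i + 1) rfl hij hno,
            ih (j.toNat + 1) (by omega)]
      · -- not '['
        rw [if_neg hbr,
          if_neg (show ¬ (cs[i] = '[' ∧ (i : Int) < pvRlast cs 0 (-1)) from fun hc => hbr hc.1)]
        by_cases hst : cs[i] = '*' ∧ i = cs.length - 1
        · rw [if_pos hst, if_pos hst, ih (i + 1) (by omega)]
        · rw [if_neg hst, if_neg hst, ih (i + 1) (by omega)]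
    · rw [pvAgo, dif_neg h, List.drop_eq_nil_of_le (by omega), pvBgo]

-- ===== VERDICT (by name: the statement is the Claim_ definition above) =====
theorem effatha_variant_flags_spec : Claim_equal_effatha_variant_flags := by
  intro seq _
  unfold Spec_effatha_variant_flags effatha_variant_flags effatha_variant_flags_alt
  simpa using pvMain seq.toList seq.toList.length 0 (by omega)
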